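-- pv_equiv track=rewrite | github.com/YarrowRen/MahjongCLI | tests/test_yaku.py | make_all_34
-- ===== SOURCE A (Python) =====
-- def make_all_34(closed_str, honor_counts=None):
--     """Build all_tiles_34 from string."""
--     arr = [0] * 34
--     numbers = []
--     for ch in closed_str:
--         if ch.isdigit():
--             numbers.append(int(ch))
--         elif ch in ('m', 'p', 's'):
--             offset = {'m': 0, 'p': 9, 's': 18}[ch]
--             for n in numbers:
--                 arr[offset + n - 1] += 1
--             numbers = []
--     if honor_counts:
--         for idx, count in honor_counts.items():
--             arr[idx] = count
--     return arr
-- ===== SOURCE B (Python) =====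
-- def make_all_34(closed_str, honor_counts=None):
--     """Build all_tiles_34 from string (single right-to-left pass, no digit buffer)."""
--     arr = [0] * 34
--     offset = None
--     for ch in reversed(closed_str):
--         if ch == 'm':
--             offset = 0
--         elif ch == 'p':
--             offset = 9
--         elif ch == 's':
--             offset = 18
--         elif ch.isdigit() and offset is not None:
--             arr[offset + int(ch) - 1] += 1
--     if honor_counts:
--         for idx, count in honor_counts.items():
--             arr[idx] = count
--     return arr
-- ===== Notes on version B (the rewrite author's own statement) =====
-- stated objective: simpler
-- what changed: Replaces A's digit buffer plus inner flush loop with a single right-to-left scan that keeps only the current suit offset and increments the count array immediately at each digit.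
import Mathlib
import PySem

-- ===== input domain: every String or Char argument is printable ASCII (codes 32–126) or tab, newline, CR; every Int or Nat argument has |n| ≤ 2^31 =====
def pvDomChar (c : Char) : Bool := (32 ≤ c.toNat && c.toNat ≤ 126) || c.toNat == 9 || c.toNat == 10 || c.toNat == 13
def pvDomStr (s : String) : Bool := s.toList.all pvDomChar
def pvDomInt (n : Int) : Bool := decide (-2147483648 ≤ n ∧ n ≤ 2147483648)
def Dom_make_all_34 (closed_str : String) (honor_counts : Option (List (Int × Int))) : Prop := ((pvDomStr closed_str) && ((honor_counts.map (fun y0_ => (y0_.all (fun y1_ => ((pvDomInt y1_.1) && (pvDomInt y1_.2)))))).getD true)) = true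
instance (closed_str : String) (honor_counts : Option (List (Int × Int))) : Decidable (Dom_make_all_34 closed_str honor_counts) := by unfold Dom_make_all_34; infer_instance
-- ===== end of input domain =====

-- B replaces A's digit buffer + inner flush loop by a single right-to-left pass keeping
-- only the current suit offset (objective: simpler; same return value everywhere A returns).

-- `arr[i] += 1` (Python wrap-around indexing; indices here are always in range -1..26 of a
-- length-34 list, so the total forms are exact)
def pvBump (a : List Int) (i : Int) : List Int :=
  PySem.List.pySetD a i (PySem.List.pyGetD a i 0 + 1)

-- the trailing `if honor_counts: for idx, count in honor_counts.items(): arr[idx] = count`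
-- (identical text in both Pythons; a fold over [] is a no-op, matching dict falsiness)
def pvHonor (arr : List Int) (honor_counts : Option (List (Int × Int))) : List Int :=
  match honor_counts with
  | none => arr
  | some l => l.foldl (fun a p => PySem.List.pySetD a p.1 p.2) arr

-- int(ch) for a digit character (exact: on the ASCII domain isdigit means '0'..'9')
def pvVal (ch : Char) : Int := (ch.toNat : Int) - 48

-- {'m': 0, 'p': 9, 's': 18}[ch] (only ever applied to 'm'/'p'/'s')
def pvOffc (ch : Char) : Int := if ch = 'm' then 0 else if ch = 'p' then 9 else 18

-- ===== PORT A =====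
-- loop body of A: state = (arr, numbers)
def pvStepA (st : List Int × List Int) (ch : Char) : List Int × List Int :=
  if PySem.Chars.isdigit ch then (st.1, st.2 ++ [pvVal ch])
  else if ch = 'm' ∨ ch = 'p' ∨ ch = 's' then
    (st.2.foldl (fun a n => pvBump a (pvOffc ch + n - 1)) st.1, [])
  else st

def make_all_34 (closed_str : String) (honor_counts : Option (List (Int × Int))) : List Int :=
  pvHonor (closed_str.toList.foldl pvStepA (List.replicate 34 (0:Int), [])).1 honor_counts

-- ===== PORT B =====
-- loop body of B: state = (arr, offset), scanning reversed(closed_str)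
def pvStepB (st : List Int × Option Int) (ch : Char) : List Int × Option Int :=
  if ch = 'm' then (st.1, some 0)
  else if ch = 'p' then (st.1, some 9)
  else if ch = 's' then (st.1, some 18)
  else if PySem.Chars.isdigit ch then
    match st.2 with
    | some off => (pvBump st.1 (off + pvVal ch - 1), st.2)
    | none => st
  else st

def make_all_34_alt (closed_str : String) (honor_counts : Option (List (Int × Int))) : List Int :=
  pvHonor (closed_str.toList.reverse.foldl pvStepB (List.replicate 34 (0:Int), none)).1 honor_counts

-- ===== PRECONDITION & SPEC =====
-- Pre_ excludes exactly the inputs where the Python A raises IndexError (an honor_counts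
-- key idx with idx < -34 or 34 <= idx); A returns no value outside Pre_.
def Pre_make_all_34 (closed_str : String) (honor_counts : Option (List (Int × Int))) : Prop :=
  ∀ p ∈ honor_counts.getD [], PySem.Raise.InRange 34 p.1
instance (closed_str : String) (honor_counts : Option (List (Int × Int))) : Decidable (Pre_make_all_34 closed_str honor_counts) := by unfold Pre_make_all_34; infer_instance

def pvWitness_make_all_34 : String × (Option (List (Int × Int))) := ("123m55p0z", some [(27, 2), (-1, 1)])

def Spec_make_all_34 (closed_str : String) (honor_counts : Option (List (Int × Int))) (out : List Int) : Prop := out = make_all_34_alt closed_str honor_counts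
instance (closed_str : String) (honor_counts : Option (List (Int × Int))) (out : List Int) : Decidable (Spec_make_all_34 closed_str honor_counts out) := by unfold Spec_make_all_34; infer_instance

-- ===== CLAIM (what is proved, stated in full; the proofs are below) =====
def Claim_equal_make_all_34 : Prop := ∀ (closed_str : String) (honor_counts : Option (List (Int × Int))), Dom_make_all_34 closed_str honor_counts → Pre_make_all_34 closed_str honor_counts → Spec_make_all_34 closed_str honor_counts (make_all_34 closed_str honor_counts)

-- ===== LEMMAS AND PROOFS =====

-- the multiset-of-increments view: both loops apply pvBump once per (digit, matching suit
-- letter to its right) pair; only the order differs, and pvBump commutes with itself.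

lemma pvIdx?_lt {n : ℕ} {i : ℤ} {k : ℕ} (h : PySem.List.pyIdx? n i = some k) : k < n := by
  unfold PySem.List.pyIdx? at h
  split_ifs at h <;> simp_all <;> omega

lemma pvBump_none {a : List Int} {i : Int} (h : PySem.List.pyIdx? a.length i = none) :
    pvBump a i = a := by
  unfold pvBump PySem.List.pySetD PySem.List.pySet? PySem.List.pyGetD PySem.List.pyGet?
  simp [h]

lemma pvBump_some {a : List Int} {i : Int} {k : ℕ} (h : PySem.List.pyIdx? a.length i = some k) :
    pvBump a i = a.set k ((a[k]?.getD 0) + 1) := by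
  unfold pvBump PySem.List.pySetD PySem.List.pySet? PySem.List.pyGetD PySem.List.pyGet?
  simp [h]

lemma pvBump_length (a : List Int) (i : Int) : (pvBump a i).length = a.length := by
  cases h : PySem.List.pyIdx? a.length i with
  | none => rw [pvBump_none h]
  | some k => rw [pvBump_some h]; simp

lemma pvBump_comm (a : List Int) (i j : Int) :
    pvBump (pvBump a i) j = pvBump (pvBump a j) i := by
  cases hi : PySem.List.pyIdx? a.length i with
  | none =>
    have hi' : PySem.List.pyIdx? (pvBump a j).length i = none := by
      rw [pvBump_length]; exact hi
    rw [pvBump_none hi, pvBump_none hi']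
  | some k1 =>
    cases hj : PySem.List.pyIdx? a.length j with
    | none =>
      have hj' : PySem.List.pyIdx? (pvBump a i).length j = none := by
        rw [pvBump_length]; exact hj
      rw [pvBump_none hj, pvBump_none hj']
    | some k2 =>
      have hk1 : k1 < a.length := pvIdx?_lt hi
      have hk2 : k2 < a.length := pvIdx?_lt hj
      have hi' : PySem.List.pyIdx? (pvBump a j).length i = some k1 := by
        rw [pvBump_length]; exact hi
      have hj' : PySem.List.pyIdx? (pvBump a i).length j = some k2 := by
        rw [pvBump_length]; exact hj
      rw [pvBump_some hj', pvBump_some hi', pvBump_some hi, pvBump_some hj]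
      by_cases hk : k1 = k2
      · subst hk
        simp [List.getElem?_set_self', List.set_set, List.getElem?_eq_getElem hk1]
      · rw [List.getElem?_set_ne (by omega), List.getElem?_set_ne (by omega),
            List.set_comm _ _ (by omega)]

-- index sequence generated by A's loop (digits buffered, flushed at suit letters)
def pvIdxA : List Char → List Int → List Int
  | [], _ => []
  | ch :: t, nums =>
    if PySem.Chars.isdigit ch then pvIdxA t (nums ++ [pvVal ch])
    else if ch = 'm' ∨ ch = 'p' ∨ ch = 's' then
      nums.map (fun n => pvOffc ch + n - 1) ++ pvIdxA t []
    else pvIdxA t nums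

-- index sequence generated by B's loop over the reversed string
def pvIdxB : List Char → Option Int → List Int
  | [], _ => []
  | ch :: t, o =>
    if ch = 'm' then pvIdxB t (some 0)
    else if ch = 'p' then pvIdxB t (some 9)
    else if ch = 's' then pvIdxB t (some 18)
    else if PySem.Chars.isdigit ch then
      match o with
      | some off => (off + pvVal ch - 1) :: pvIdxB t o
      | none => pvIdxB t o
    else pvIdxB t o

-- A's pending digit buffer after a scan
def pvPend : List Char → List Int → List Int
  | [], nums => nums
  | ch :: t, nums =>
    if PySem.Chars.isdigit ch then pvPend t (nums ++ [pvVal ch])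
    else if ch = 'm' ∨ ch = 'p' ∨ ch = 's' then pvPend t []
    else pvPend t nums

def pvFlushO (o : Option Int) (nums : List Int) : List Int :=
  match o with
  | none => []
  | some off => nums.map (fun n => off + n - 1)

lemma pvFlushO_nil (o : Option Int) : pvFlushO o [] = [] := by
  cases o <;> rfl

lemma pvA_loop (s : List Char) (arr : List Int) (nums : List Int) :
    (s.foldl pvStepA (arr, nums)).1 = (pvIdxA s nums).foldl pvBump arr := by
  induction s generalizing arr nums with
  | nil => rfl
  | cons ch t ih =>
    simp only [List.foldl_cons, pvStepA, pvIdxA]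
    split_ifs with h1 h2
    · exact ih arr (nums ++ [pvVal ch])
    · rw [ih, List.foldl_append]
      congr 1
      rw [List.foldl_map]
    · exact ih arr nums

lemma pvB_loop (l : List Char) (arr : List Int) (o : Option Int) :
    (l.foldl pvStepB (arr, o)).1 = (pvIdxB l o).foldl pvBump arr := by
  induction l generalizing arr o with
  | nil => rfl
  | cons ch t ih =>
    simp only [List.foldl_cons, pvStepB, pvIdxB]
    split_ifs with h1 h2 h3 h4
    · exact ih arr (some 0)
    · exact ih arr (some 9)
    · exact ih arr (some 18)
    · cases o with
      | none => exact ih arr none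
      | some off => simpa using ih (pvBump arr (off + pvVal ch - 1)) (some off)
    · exact ih arr o

lemma pvPend_snoc_digit (t : List Char) {ch : Char} (h : PySem.Chars.isdigit ch)
    (nums : List Int) : pvPend (t ++ [ch]) nums = pvPend t nums ++ [pvVal ch] := by
  induction t generalizing nums with
  | nil => simp [pvPend, h]
  | cons c t ih =>
    simp only [List.cons_append, pvPend]
    split_ifs <;> exact ih _

lemma pvPend_snoc_letter (t : List Char) {ch : Char} (h1 : ¬ PySem.Chars.isdigit ch)
    (h2 : ch = 'm' ∨ ch = 'p' ∨ ch = 's') (nums : List Int) :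
    pvPend (t ++ [ch]) nums = [] := by
  induction t generalizing nums with
  | nil => simp [pvPend, h1, h2]
  | cons c t ih =>
    simp only [List.cons_append, pvPend]
    split_ifs <;> exact ih _

lemma pvPend_snoc_other (t : List Char) {ch : Char} (h1 : ¬ PySem.Chars.isdigit ch)
    (h2 : ¬ (ch = 'm' ∨ ch = 'p' ∨ ch = 's')) (nums : List Int) :
    pvPend (t ++ [ch]) nums = pvPend t nums := by
  induction t generalizing nums with
  | nil => simp [pvPend, h1, h2]
  | cons c t ih =>
    simp only [List.cons_append, pvPend]
    split_ifs <;> exact ih _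

lemma pvIdxA_snoc_digit (t : List Char) {ch : Char} (h : PySem.Chars.isdigit ch)
    (nums : List Int) : pvIdxA (t ++ [ch]) nums = pvIdxA t nums := by
  induction t generalizing nums with
  | nil => simp [pvIdxA, h]
  | cons c t ih =>
    simp only [List.cons_append, pvIdxA]
    split_ifs <;> simp [ih]

lemma pvIdxA_snoc_letter (t : List Char) {ch : Char} (h1 : ¬ PySem.Chars.isdigit ch)
    (h2 : ch = 'm' ∨ ch = 'p' ∨ ch = 's') (nums : List Int) :
    pvIdxA (t ++ [ch]) nums =
      pvIdxA t nums ++ (pvPend t nums).map (fun n => pvOffc ch + n - 1) := by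
  induction t generalizing nums with
  | nil => simp [pvIdxA, pvPend, h1, h2]
  | cons c t ih =>
    simp only [List.cons_append, pvIdxA, pvPend]
    split_ifs <;> simp [ih]

lemma pvIdxA_snoc_other (t : List Char) {ch : Char} (h1 : ¬ PySem.Chars.isdigit ch)
    (h2 : ¬ (ch = 'm' ∨ ch = 'p' ∨ ch = 's')) (nums : List Int) :
    pvIdxA (t ++ [ch]) nums = pvIdxA t nums := by
  induction t generalizing nums with
  | nil => simp [pvIdxA, h1, h2]
  | cons c t ih =>
    simp only [List.cons_append, pvIdxA]
    split_ifs <;> simp [ih]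

lemma pvIdx_perm (l : List Char) (o : Option Int) :
    (pvIdxB l o).Perm (pvIdxA l.reverse [] ++ pvFlushO o (pvPend l.reverse [])) := by
  induction l generalizing o with
  | nil => simp [pvIdxB, pvIdxA, pvPend, pvFlushO_nil]
  | cons ch t ih =>
    rw [List.reverse_cons]
    by_cases hm : ch = 'm'
    · subst hm
      rw [pvIdxA_snoc_letter t.reverse (by decide) (by decide),
          pvPend_snoc_letter t.reverse (by decide) (by decide), pvFlushO_nil,
          List.append_nil]
      simp only [pvIdxB]
      have h0 : pvOffc 'm' = 0 := by decide
      simpa [pvFlushO, h0] using ih (some 0)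
    · by_cases hp : ch = 'p'
      · subst hp
        rw [pvIdxA_snoc_letter t.reverse (by decide) (by decide),
            pvPend_snoc_letter t.reverse (by decide) (by decide), pvFlushO_nil,
            List.append_nil]
        simp only [pvIdxB, if_neg (by decide : ¬('p' = 'm'))]
        have h0 : pvOffc 'p' = 9 := by decide
        simpa [pvFlushO, h0] using ih (some 9)
      · by_cases hs : ch = 's'
        · subst hs
          rw [pvIdxA_snoc_letter t.reverse (by decide) (by decide),
              pvPend_snoc_letter t.reverse (by decide) (by decide), pvFlushO_nil,
              List.append_nil]
          simp only [pvIdxB, if_neg (by decide : ¬('s' = 'm')),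
            if_neg (by decide : ¬('s' = 'p'))]
          have h0 : pvOffc 's' = 18 := by decide
          simpa [pvFlushO, h0] using ih (some 18)
        · by_cases hd : PySem.Chars.isdigit ch
          · rw [pvIdxA_snoc_digit t.reverse hd, pvPend_snoc_digit t.reverse hd]
            simp only [pvIdxB, if_neg hm, if_neg hp, if_neg hs, if_pos hd]
            cases o with
            | none => simpa [pvFlushO] using ih none
            | some off =>
              simp only [pvFlushO, List.map_append, List.map_cons, List.map_nil]
              refine ((ih (some off)).cons _).trans ?_
              simp only [pvFlushO]
              refine (List.perm_append_singleton _ _).symm.trans ?_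
              simp [List.append_assoc]
          · rw [pvIdxA_snoc_other t.reverse hd (by tauto),
                pvPend_snoc_other t.reverse hd (by tauto)]
            simp only [pvIdxB, if_neg hm, if_neg hp, if_neg hs, if_neg hd]
            exact ih o

lemma pvFoldl_perm {l₁ l₂ : List Int} (h : l₁.Perm l₂) (arr : List Int) :
    l₁.foldl pvBump arr = l₂.foldl pvBump arr :=
  @List.Perm.foldl_eq _ _ pvBump _ _ ⟨fun a i j => pvBump_comm a i j⟩ h arr

-- ===== VERDICT (by name: the statement is the Claim_ definition above) =====
theorem make_all_34_spec : Claim_equal_make_all_34 := by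
  intro closed_str honor_counts _ _
  unfold Spec_make_all_34 make_all_34 make_all_34_alt
  rw [pvA_loop, pvB_loop]
  congr 1
  have h := pvIdx_perm closed_str.toList.reverse none
  simp only [List.reverse_reverse, pvFlushO, List.append_nil] at h
  exact (pvFoldl_perm h _).symm
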